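-- pv_equiv track=rewrite | github.com/samaleksov/nnfs | 22-backpropagation_layer.py | sum_cols
-- ===== SOURCE A (Python) =====
-- def sum_cols(A):
--     result = []
--     cols = len(A[0])
--     rows = len(A)
--
--     for col in range(cols):
--         colsum = 0
--         for row in range(rows):
--             colsum += A[row][col]
--         result.append(colsum)
--     return [result]
-- ===== SOURCE B (Python) =====
-- def sum_cols(A):
--     acc = [0] * len(A[0])
--     for row in A:
--         acc = [a + x for a, x in zip(acc, row)]
--     return [acc]
-- ===== Notes on version B (the rewrite author's own statement) =====
-- stated objective: alternative
-- what changed: Loop interchange: instead of A's column-outer/row-inner double index loop, B makes a single pass over the rows, folding each row elementwise into a running column-sum vector.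
import Mathlib
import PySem

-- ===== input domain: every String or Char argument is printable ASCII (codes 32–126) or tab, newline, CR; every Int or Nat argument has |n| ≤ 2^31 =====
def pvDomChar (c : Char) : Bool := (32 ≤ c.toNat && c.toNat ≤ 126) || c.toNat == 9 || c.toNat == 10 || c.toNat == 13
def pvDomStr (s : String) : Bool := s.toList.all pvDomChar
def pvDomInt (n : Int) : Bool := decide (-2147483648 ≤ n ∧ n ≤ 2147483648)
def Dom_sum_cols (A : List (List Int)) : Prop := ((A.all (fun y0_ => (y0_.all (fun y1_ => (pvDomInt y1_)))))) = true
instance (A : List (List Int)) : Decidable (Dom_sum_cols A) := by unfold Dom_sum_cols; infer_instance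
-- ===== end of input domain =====

-- B replaces A's column-outer/row-inner index loops by one row-wise pass folding each row into a running column-sum vector (alternative decomposition, same cost).


-- ===== PORT A =====
def sum_cols (A : List (List Int)) : List (List Int) :=
  let result : List Int := []
  let cols := (PySem.List.pyGetD A 0 []).length
  let rows := A.length
  let result := (PySem.List.pyRange 0 (cols : Int) 1).foldl (fun result col =>
    let colsum : Int := 0
    let colsum := (PySem.List.pyRange 0 (rows : Int) 1).foldl (fun colsum row =>
      colsum + PySem.List.pyGetD (PySem.List.pyGetD A row []) col 0) colsum
    result ++ [colsum]) result
  [result]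

-- ===== PORT B =====
-- acc = [0]*len(A[0]); for row in A: acc = [a+x for a,x in zip(acc,row)]; return [acc]
def sum_cols_alt (A : List (List Int)) : List (List Int) :=
  let acc0 : List Int := List.replicate (PySem.List.pyGetD A 0 []).length 0
  [A.foldl (fun acc row => (acc.zip row).map (fun p => p.1 + p.2)) acc0]

-- ===== PRECONDITION & SPEC =====
-- Pre_ excludes exactly the inputs where Python A raises IndexError: empty A, or a row shorter
-- than the first row (A[row][col] out of range).
def Pre_sum_cols (A : List (List Int)) : Prop :=
  A ≠ [] ∧ ∀ r ∈ A, (A.headD []).length ≤ r.length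
instance (A : List (List Int)) : Decidable (Pre_sum_cols A) := by unfold Pre_sum_cols; infer_instance
def pvWitness_sum_cols : List (List Int) := [[1, 2], [3, 4]]

def Spec_sum_cols (A : List (List Int)) (out : List (List Int)) : Prop := out = sum_cols_alt A
instance (A : List (List Int)) (out : List (List Int)) : Decidable (Spec_sum_cols A out) := by unfold Spec_sum_cols; infer_instance

-- ===== CLAIM (what is proved, stated in full; the proofs are below) =====
def Claim_equal_sum_cols : Prop := ∀ (A : List (List Int)), Dom_sum_cols A → Pre_sum_cols A → Spec_sum_cols A (sum_cols A)

-- ===== LEMMAS AND PROOFS =====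

theorem range_map_getD (acc : List Int) :
    (List.range acc.length).map (fun j => acc.getD j 0) = acc := by
  apply List.ext_getElem
  · simp
  · intro i h1 h2
    simp [List.getD, h2]

theorem step_getD (acc r : List Int) (hlen : acc.length ≤ r.length) (j : Nat) (hj : j < acc.length) :
    ((acc.zip r).map (fun p => p.1 + p.2)).getD j 0 = acc.getD j 0 + r.getD j 0 := by
  have hz : j < (acc.zip r).length := by simp; omega
  have hr : j < r.length := by omega
  simp [List.getD, hj, hr, List.getElem_zip]

theorem fold_eq (M : List (List Int)) : ∀ (acc : List Int),
    (∀ r ∈ M, acc.length ≤ r.length) →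
    M.foldl (fun acc row => (acc.zip row).map (fun p => p.1 + p.2)) acc
      = (List.range acc.length).map (fun j => acc.getD j 0 + (M.map (fun r => r.getD j 0)).sum) := by
  induction M with
  | nil =>
    intro acc _
    simpa using (range_map_getD acc).symm
  | cons r rs ih =>
    intro acc h
    have hlen : acc.length ≤ r.length := h r (by simp)
    have hstep : ((acc.zip r).map (fun p => p.1 + p.2)).length = acc.length := by
      simp; omega
    rw [List.foldl_cons, ih _ (by intro t ht; rw [hstep]; exact h t (List.mem_cons_of_mem _ ht)),
      hstep]
    apply List.map_congr_left
    intro j hj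
    have hj' : j < acc.length := List.mem_range.mp hj
    rw [step_getD acc r hlen j hj']
    simp [add_assoc]

-- ===== VERDICT (by name: the statement is the Claim_ definition above) =====
theorem sum_cols_spec : Claim_equal_sum_cols := by
  intro A _ hpre
  obtain ⟨hne, hmin⟩ := hpre
  obtain ⟨r0, rs, rfl⟩ := List.exists_cons_of_ne_nil hne
  unfold Spec_sum_cols sum_cols sum_cols_alt
  simp only []
  have hget0 : PySem.List.pyGetD (r0 :: rs) 0 [] = r0 := by
    simp [PySem.List.pyGetD_zero_cons]
  rw [hget0]
  rw [fold_eq (r0 :: rs) (List.replicate r0.length 0)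
      (by intro t ht; simpa using hmin t ht)]
  congr 1
  rw [PySem.List.foldl_append_singleton_eq_map, List.nil_append]
  have hinner : ∀ col : Int,
      List.foldl (fun colsum row => colsum +
          PySem.List.pyGetD (PySem.List.pyGetD (r0 :: rs) row []) col 0) 0
        (PySem.List.pyRange 0 ((r0 :: rs).length : Int) 1)
      = (((r0 :: rs)).map (fun r => PySem.List.pyGetD r col 0)).sum := by
    intro col
    rw [PySem.List.foldl_pyRange_zero_pyGetD' (r0 :: rs) ([] : List Int)
        (fun acc r => acc + PySem.List.pyGetD r col 0) 0]
    rw [PySem.List.foldl_add (g := fun r => PySem.List.pyGetD r col 0)]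
    simp
  simp only [hinner]
  rw [PySem.List.pyRange_zero_nat, List.map_map]
  simp only [List.length_replicate]
  apply List.map_congr_left
  intro j _
  simp only [Function.comp]
  simp [PySem.List.pyGetD_natCast, List.getD]
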